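-- pv_equiv track=rewrite | github.com/JuanRoche/Entrega2 | calculadora.py | most_influential
-- ===== SOURCE A (Python) =====
-- def most_influential(dic,values):
--     """conocer_influyente recorre el diccionario buscando el jugador con mas puntos y devuelve en una tupla su nombre y cantidad de puntos."""
--     max = -1
--     for name in dic:
--         stats = dic[name]
--         points = 0
--         points += stats[0] * values["goals"] + stats[1] * values["goals_avoided"] + stats[2] * values["assists"]
--         if points >= max:
--             most_influential = name
--             max = points
--     return most_influential, max
-- ===== SOURCE B (Python) =====
-- def most_influential(dic, values):
--     """Divide-and-conquer tournament: score each player once, then recursively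
--     halve the score table and let the right half win ties (>=), which preserves
--     the original last-wins rule."""
--     w = (values["goals"], values["goals_avoided"], values["assists"])
--     items = [(n, s[0] * w[0] + s[1] * w[1] + s[2] * w[2]) for n, s in dic.items()]
--
--     def tourney(part):
--         if len(part) <= 1:
--             return part[0]
--         mid = len(part) // 2
--         left = tourney(part[:mid])
--         right = tourney(part[mid:])
--         return right if right[1] >= left[1] else left
--
--     return tourney(items)
-- ===== Notes on version B (the rewrite author's own statement) =====
-- stated objective: alternative
-- what changed: A's single sentinel-seeded scan is replaced by a divide-and-conquer tournament: a score table is built once, then recursively split in half and merged with a right-biased comparison (>=), which reproduces A's last-wins tie-breaking.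
import Mathlib
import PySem

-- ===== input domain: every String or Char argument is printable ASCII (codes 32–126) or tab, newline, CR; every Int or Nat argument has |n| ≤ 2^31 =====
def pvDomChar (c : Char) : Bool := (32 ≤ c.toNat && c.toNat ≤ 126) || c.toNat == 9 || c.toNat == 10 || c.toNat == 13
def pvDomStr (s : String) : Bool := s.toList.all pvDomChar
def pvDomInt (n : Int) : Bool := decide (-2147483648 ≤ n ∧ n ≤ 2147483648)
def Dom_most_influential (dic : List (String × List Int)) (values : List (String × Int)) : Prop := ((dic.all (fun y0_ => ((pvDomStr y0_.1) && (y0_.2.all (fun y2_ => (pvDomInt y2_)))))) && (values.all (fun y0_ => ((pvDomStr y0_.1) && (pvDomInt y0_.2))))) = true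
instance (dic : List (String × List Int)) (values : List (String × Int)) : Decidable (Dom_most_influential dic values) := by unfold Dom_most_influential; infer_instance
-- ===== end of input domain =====

-- B replaces A's single sentinel-seeded scan by a divide-and-conquer tournament over a score table,
-- merged with a right-biased comparison (>=) that preserves A's last-wins tie rule; A = B on Pre_.

-- ===== PORT A =====
-- transliteration of A: max = -1; for name in dic: stats = dic[name]; points = 0 + …; if points >= max: …
def most_influential (dic : List (String × List Int)) (values : List (String × Int)) : String × Int :=
  let d := PySem.Dict.ofList dic
  let v := PySem.Dict.ofList values
  let st := d.keys.foldl (fun (acc : Option String × Int) name =>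
      let stats := d.getD name []
      let points : Int := 0 + (PySem.List.pyGetD stats 0 0 * v.getD "goals" 0
        + PySem.List.pyGetD stats 1 0 * v.getD "goals_avoided" 0
        + PySem.List.pyGetD stats 2 0 * v.getD "assists" 0)
      if acc.2 ≤ points then (some name, points) else acc) (none, -1)
  (st.1.getD "", st.2)

-- ===== PORT B =====
-- transliteration of Source B's tourney(part); the Nat fuel (called with part.length, which bounds the
-- recursion depth) only makes the same recursion total in Lean; part[:mid] = take mid and
-- part[mid:] = drop mid are exact for 0 ≤ mid ≤ len (PySem.List.slice_to / slice_from);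
-- part[0] on [] raises IndexError in Python (outside Pre_), here the default ("", 0)
def pvTourney : Nat → List (String × Int) → String × Int
  | _, [] => ("", 0)
  | _, [x] => x
  | 0, x :: _ :: _ => x            -- never reached when fuel ≥ part.length
  | f + 1, x :: y :: rest =>
      let part := x :: y :: rest
      let mid := part.length / 2
      let left := pvTourney f (part.take mid)
      let right := pvTourney f (part.drop mid)
      if left.2 ≤ right.2 then right else left

-- transliteration of Source B: w = (…); items = [(n, s[0]*w[0]+s[1]*w[1]+s[2]*w[2]) …]; tourney(items)
def most_influential_alt (dic : List (String × List Int)) (values : List (String × Int)) : String × Int :=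
  let v := PySem.Dict.ofList values
  let w : Int × Int × Int := (v.getD "goals" 0, v.getD "goals_avoided" 0, v.getD "assists" 0)
  let items := (PySem.Dict.ofList dic).items.map
      (fun p => (p.1, PySem.List.pyGetD p.2 0 0 * w.1
        + PySem.List.pyGetD p.2 1 0 * w.2.1 + PySem.List.pyGetD p.2 2 0 * w.2.2))
  pvTourney items.length items

-- ===== PRECONDITION & SPEC =====
-- weighted score of one stats list (used only by Pre_/Raises_, not by the ports)
def pvScore (v : PySem.Dict String Int) (stats : List Int) : Int :=
  PySem.List.pyGetD stats 0 0 * v.getD "goals" 0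
    + PySem.List.pyGetD stats 1 0 * v.getD "goals_avoided" 0
    + PySem.List.pyGetD stats 2 0 * v.getD "assists" 0

-- Pre_ = exactly the inputs on which A returns: values has the three weight keys, every stats list has
-- at least 3 entries, and some player's score reaches A's -1 sentinel (otherwise A raises
-- KeyError / IndexError / UnboundLocalError respectively).
def Pre_most_influential (dic : List (String × List Int)) (values : List (String × Int)) : Prop :=
  (PySem.Dict.ofList values).contains "goals" = true ∧
  (PySem.Dict.ofList values).contains "goals_avoided" = true ∧
  (PySem.Dict.ofList values).contains "assists" = true ∧
  (∀ p ∈ (PySem.Dict.ofList dic).items, 3 ≤ p.2.length) ∧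
  (∃ p ∈ (PySem.Dict.ofList dic).items, -1 ≤ pvScore (PySem.Dict.ofList values) p.2)
instance (dic : List (String × List Int)) (values : List (String × Int)) : Decidable (Pre_most_influential dic values) := by unfold Pre_most_influential; infer_instance

def pvWitness_most_influential : (List (String × List Int)) × (List (String × Int)) :=
  ([("ana", [1, 0, 2]), ("bob", [2, 1, 0])], [("goals", 3), ("goals_avoided", 2), ("assists", 1)])

def Spec_most_influential (dic : List (String × List Int)) (values : List (String × Int)) (out : String × Int) : Prop := out = most_influential_alt dic values
instance (dic : List (String × List Int)) (values : List (String × Int)) (out : String × Int) : Decidable (Spec_most_influential dic values out) := by unfold Spec_most_influential; infer_instance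

-- ===== CLAIM (what is proved, stated in full; the proofs are below) =====
def Claim_equal_most_influential : Prop := ∀ (dic : List (String × List Int)) (values : List (String × Int)), Dom_most_influential dic values → Pre_most_influential dic values → Spec_most_influential dic values (most_influential dic values)

-- ===== LEMMAS AND PROOFS =====

-- A's comparison step over already-scored (name, score) pairs, and the right-biased max
def stepA (acc : Option String × Int) (p : String × Int) : Option String × Int :=
  if acc.2 ≤ p.2 then (some p.1, p.2) else acc
def rbOp (a b : String × Int) : String × Int := if a.2 ≤ b.2 then b else a
def rbMax : List (String × Int) → String × Int
  | [] => ("", 0)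
  | h :: t => t.foldl rbOp h

lemma rbOp_assoc (a b c : String × Int) : rbOp (rbOp a b) c = rbOp a (rbOp b c) := by
  unfold rbOp; split_ifs <;> first | rfl | (exfalso; omega)

lemma foldl_rbOp_act (t : List (String × Int)) : ∀ a h,
    t.foldl rbOp (rbOp a h) = rbOp a (t.foldl rbOp h) := by
  induction t with
  | nil => intro a h; rfl
  | cons x t ih => intro a h; simp only [List.foldl_cons, rbOp_assoc]; exact ih a (rbOp h x)

lemma rbMax_append (l1 l2 : List (String × Int)) (h1 : l1 ≠ []) (h2 : l2 ≠ []) :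
    rbMax (l1 ++ l2) = rbOp (rbMax l1) (rbMax l2) := by
  obtain ⟨h, t, rfl⟩ := List.exists_cons_of_ne_nil h1
  obtain ⟨h', t', rfl⟩ := List.exists_cons_of_ne_nil h2
  simp only [rbMax, List.cons_append, List.foldl_cons, List.foldl_append]
  exact foldl_rbOp_act t' _ h'

lemma pvTourney_eq_rbMax : ∀ (f : Nat), ∀ (l : List (String × Int)),
    l ≠ [] → l.length ≤ f + 1 → pvTourney f l = rbMax l := by
  intro f
  induction f with
  | zero =>
    intro l hne hlen
    match l with
    | [x] => rfl
    | x :: y :: r => simp at hlen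
  | succ f ih =>
    intro l hne hlen
    match l with
    | [x] => rfl
    | x :: y :: rest =>
      simp only [pvTourney]
      set part := x :: y :: rest with hpart
      have hlen2 : 2 ≤ part.length := by simp [hpart]
      set mid := part.length / 2 with hmid
      have hmid1 : 1 ≤ mid := by omega
      have hmidlt : mid < part.length := by omega
      have htake : (part.take mid).length = mid := by
        simp [List.length_take]; omega
      have hdrop : (part.drop mid).length = part.length - mid := by simp
      have h1 : part.take mid ≠ [] := by
        intro h; rw [h] at htake; simp at htake; omega
      have h2 : part.drop mid ≠ [] := by
        intro h; rw [h] at hdrop; simp at hdrop; omega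
      rw [ih _ h1 (by omega), ih _ h2 (by omega)]
      have := rbMax_append (part.take mid) (part.drop mid) h1 h2
      rw [List.take_append_drop] at this
      rw [this]; unfold rbOp; rfl

lemma foldl_stepA_some (l : List (String × Int)) : ∀ (n : String) (m : Int),
    l.foldl stepA (some n, m) = (some (l.foldl rbOp (n, m)).1, (l.foldl rbOp (n, m)).2) := by
  induction l with
  | nil => intro n m; rfl
  | cons p t ih =>
    intro n m
    simp only [List.foldl_cons, stepA, rbOp]
    by_cases h : m ≤ p.2 <;> simp [h] <;> exact ih _ _

-- once some later element strictly beats both accumulators, the starting accumulator is irrelevant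
lemma foldl_rbOp_switch : ∀ (t : List (String × Int)) (a b : String × Int),
    (∃ q ∈ t, a.2 < q.2 ∧ b.2 < q.2) → t.foldl rbOp a = t.foldl rbOp b := by
  intro t
  induction t with
  | nil => intro a b h; simp at h
  | cons x t ih =>
    intro a b ⟨q, hq, ha, hb⟩
    simp only [List.foldl_cons]
    rcases List.mem_cons.mp hq with rfl | hmem
    · have h1 : rbOp a q = q := by unfold rbOp; simp [le_of_lt ha]
      have h2 : rbOp b q = q := by unfold rbOp; simp [le_of_lt hb]
      rw [h1, h2]
    · by_cases hx : x.2 < q.2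
      · apply ih
        refine ⟨q, hmem, ?_, ?_⟩ <;> unfold rbOp <;> split_ifs <;> assumption
      · have h1 : rbOp a x = x := by unfold rbOp; simp; omega
        have h2 : rbOp b x = x := by unfold rbOp; simp; omega
        rw [h1, h2]

-- A's sentinel-seeded fold ends at the right-biased maximum once some score reaches -1
lemma foldl_stepA_sentinel : ∀ (l : List (String × Int)),
    (∃ p ∈ l, (-1 : Int) ≤ p.2) →
    l.foldl stepA ((none : Option String), (-1 : Int)) = (some (rbMax l).1, (rbMax l).2) := by
  intro l
  induction l with
  | nil => intro h; simp at h
  | cons p t ih =>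
    intro hex
    simp only [List.foldl_cons]
    by_cases hp : (-1 : Int) ≤ p.2
    · have h1 : stepA (none, -1) p = (some p.1, p.2) := by simp [stepA, hp]
      rw [h1]
      have := foldl_stepA_some t p.1 p.2
      simpa [rbMax] using this
    · have h1 : stepA (none, -1) p = (none, -1) := by simp [stepA]; omega
      rw [h1]
      have hex' : ∃ q ∈ t, (-1 : Int) ≤ q.2 := by
        obtain ⟨q, hq, hq2⟩ := hex
        rcases List.mem_cons.mp hq with rfl | hmem
        · exact absurd hq2 hp
        · exact ⟨q, hmem, hq2⟩
      rw [ih hex']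
      obtain ⟨h', t', rfl⟩ := List.exists_cons_of_ne_nil
        (by rintro rfl; obtain ⟨q, hq, _⟩ := hex'; simp at hq : t ≠ [])
      have hr : rbMax (p :: h' :: t') = rbMax (h' :: t') := by
        simp only [rbMax, List.foldl_cons]
        by_cases hph : p.2 ≤ h'.2
        · have : rbOp p h' = h' := by unfold rbOp; simp [hph]
          rw [this]
        · have hop : rbOp p h' = p := by unfold rbOp; simp; omega
          rw [hop]
          obtain ⟨q, hq, hq2⟩ := hex'
          rcases List.mem_cons.mp hq with rfl | hmem
          · omega
          · exact foldl_rbOp_switch t' p h' ⟨q, hmem, by omega, by omega⟩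
      rw [hr]

-- A's fold over d.keys equals the scored fold with stepA
lemma a_fold_eq (d : PySem.Dict String (List Int)) (v : PySem.Dict String Int)
    (hnd : d.keys.Nodup) :
    d.keys.foldl (fun (acc : Option String × Int) name =>
      let stats := d.getD name []
      let points : Int := 0 + (PySem.List.pyGetD stats 0 0 * v.getD "goals" 0
        + PySem.List.pyGetD stats 1 0 * v.getD "goals_avoided" 0
        + PySem.List.pyGetD stats 2 0 * v.getD "assists" 0)
      if acc.2 ≤ points then (some name, points) else acc) (none, -1)
    = (d.items.map (fun p => (p.1, pvScore v p.2))).foldl stepA (none, -1) := by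
  have hk : d.keys = d.items.map (·.1) := rfl
  rw [hk, List.foldl_map, List.foldl_map]
  apply PySem.List.foldl_congr_mem
  intro acc p hp
  obtain ⟨k, stats⟩ := p
  have : d.getD k [] = stats := PySem.Dict.getD_of_mem_items d hp hnd []
  simp only [this, stepA, pvScore, zero_add]

-- ===== VERDICT =====
theorem most_influential_spec : Claim_equal_most_influential := by
  intro dic values _ hpre
  obtain ⟨_, _, _, hlen, hex⟩ := hpre
  unfold Spec_most_influential most_influential most_influential_alt
  set d := PySem.Dict.ofList dic with hd
  set v := PySem.Dict.ofList values with hv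
  simp only []
  rw [a_fold_eq d v (PySem.Dict.nodup_keys_ofList dic)]
  set s := d.items.map (fun p => (p.1, pvScore v p.2)) with hs
  have hBitems : d.items.map
      (fun p => (p.1, PySem.List.pyGetD p.2 0 0 * v.getD "goals" 0
        + PySem.List.pyGetD p.2 1 0 * v.getD "goals_avoided" 0
        + PySem.List.pyGetD p.2 2 0 * v.getD "assists" 0)) = s := by
    simp [hs, pvScore]
  rw [hBitems]
  have hex' : ∃ p ∈ s, (-1 : Int) ≤ p.2 := by
    obtain ⟨p, hp, hsc⟩ := hex
    exact ⟨(p.1, pvScore v p.2), List.mem_map_of_mem hp, hsc⟩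
  have hne : s ≠ [] := by intro h0; rw [h0] at hex'; obtain ⟨p, hp, _⟩ := hex'; simp at hp
  rw [foldl_stepA_sentinel s hex', pvTourney_eq_rbMax s.length s hne (by omega)]
  rfl
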